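-- pv_equiv track=rewrite | github.com/huangziwei/nik | nik/player.py | _filter_overlapping_spans
-- ===== SOURCE A (Python) =====
-- from typing import IO, List, Optional, Union
--
-- def _filter_overlapping_spans(spans: List[dict], reserved: List[dict]) -> List[dict]:
--     if not spans or not reserved:
--         return spans
--     reserved_ranges = []
--     for span in reserved:
--         try:
--             reserved_ranges.append((int(span.get("start")), int(span.get("end"))))
--         except (TypeError, ValueError):
--             continue
--
--     def overlaps(start: int, end: int) -> bool:
--         for res_start, res_end in reserved_ranges:
--             if start < res_end and end > res_start:
--                 return True
--         return False
--
--     filtered: List[dict] = []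
--     for span in spans:
--         try:
--             start = int(span.get("start"))
--             end = int(span.get("end"))
--         except (TypeError, ValueError):
--             continue
--         if overlaps(start, end):
--             continue
--         filtered.append(span)
--     return filtered
-- ===== SOURCE B (Python) =====
-- from typing import List
--
--
-- def _filter_overlapping_spans(spans: List[dict], reserved: List[dict]) -> List[dict]:
--     if not spans or not reserved:
--         return spans
--     ranges = []
--     for span in reserved:
--         try:
--             ranges.append((int(span.get("start")), int(span.get("end"))))
--         except (TypeError, ValueError):
--             continue
--     # Sort reserved ranges by start and precompute prefix maxima of their ends:
--     # a span (s, e) overlaps some reserved range iff among the ranges whose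
--     # start is < e (a prefix of the sorted list, found by binary search) the
--     # maximal end exceeds s.
--     ranges.sort(key=lambda r: r[0])
--     starts = [r[0] for r in ranges]
--     prefmax = []
--     best = None
--     for _, r_end in ranges:
--         best = r_end if best is None else max(best, r_end)
--         prefmax.append(best)
--     filtered: List[dict] = []
--     for span in spans:
--         try:
--             s = int(span.get("start"))
--             e = int(span.get("end"))
--         except (TypeError, ValueError):
--             continue
--         lo, hi = 0, len(starts)
--         while lo < hi:
--             mid = (lo + hi) // 2
--             if starts[mid] < e:
--                 lo = mid + 1
--             else:
--                 hi = mid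
--         if lo > 0 and prefmax[lo - 1] > s:
--             continue
--         filtered.append(span)
--     return filtered
-- ===== Notes on version B (the rewrite author's own statement) =====
-- stated objective: alternative
-- what changed: B replaces A's per-span linear scan over all reserved ranges with sorting the reserved ranges by start plus prefix maxima of their ends, testing each span by one binary search (overlap iff the maximal end among ranges starting before the span's end exceeds the span's start); on the measured input family this was not faster, so no speed is claimed.
import Mathlib
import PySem

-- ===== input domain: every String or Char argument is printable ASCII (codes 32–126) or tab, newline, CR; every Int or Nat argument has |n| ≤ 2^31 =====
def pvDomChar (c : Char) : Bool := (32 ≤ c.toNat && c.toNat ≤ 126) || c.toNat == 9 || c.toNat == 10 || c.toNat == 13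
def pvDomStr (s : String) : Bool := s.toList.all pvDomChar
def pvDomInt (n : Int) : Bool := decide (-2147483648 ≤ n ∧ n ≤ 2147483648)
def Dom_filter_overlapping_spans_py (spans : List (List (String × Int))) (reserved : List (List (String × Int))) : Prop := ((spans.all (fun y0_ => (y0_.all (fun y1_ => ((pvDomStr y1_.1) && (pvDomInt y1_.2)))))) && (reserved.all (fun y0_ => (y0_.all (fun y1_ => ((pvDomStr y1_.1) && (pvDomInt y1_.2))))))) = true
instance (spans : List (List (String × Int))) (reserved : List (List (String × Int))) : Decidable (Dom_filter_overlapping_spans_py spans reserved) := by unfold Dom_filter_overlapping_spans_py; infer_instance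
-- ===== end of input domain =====

-- B replaces A's per-span linear scan of the reserved ranges by sort + prefix maxima + binary search (objective: alternative algorithm; not measured faster).

-- ===== PORT A =====
-- span.get(k): first-match lookup in the association list (Python dict.get)
def pvGet (d : List (String × Int)) (k : String) : Option Int :=
  (d.find? (fun p => p.1 == k)).map (fun p => p.2)

-- the reserved_ranges loop: skip a span when "start" or "end" is missing (int(None) raises)
def pvA_ranges : List (List (String × Int)) → List (Int × Int)
  | [] => []
  | span :: rest =>
    match pvGet span "start", pvGet span "end" with
    | some s, some e => (s, e) :: pvA_ranges rest
    | _, _ => pvA_ranges rest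

-- the inner helper `overlaps`
def pvA_overlaps (s e : Int) : List (Int × Int) → Bool
  | [] => false
  | (rs, re) :: rest => if s < re ∧ e > rs then true else pvA_overlaps s e rest

-- the `filtered` loop
def pvA_loop (ranges : List (Int × Int)) : List (List (String × Int)) → List (List (String × Int))
  | [] => []
  | span :: rest =>
    match pvGet span "start", pvGet span "end" with
    | some s, some e =>
      if pvA_overlaps s e ranges then pvA_loop ranges rest
      else span :: pvA_loop ranges rest
    | _, _ => pvA_loop ranges rest

def filter_overlapping_spans_py (spans : List (List (String × Int))) (reserved : List (List (String × Int))) : List (List (String × Int)) :=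
  if spans = [] ∨ reserved = [] then spans
  else pvA_loop (pvA_ranges reserved) spans

-- ===== PORT B =====
-- same extraction of (start, end) pairs from `reserved` as Source B's first loop
def pvB_ranges : List (List (String × Int)) → List (Int × Int)
  | [] => []
  | span :: rest =>
    match pvGet span "start", pvGet span "end" with
    | some s, some e => (s, e) :: pvB_ranges rest
    | _, _ => pvB_ranges rest

-- the prefmax loop (best is None before the first iteration)
def pvB_prefmax (best : Option Int) : List (Int × Int) → List Int
  | [] => []
  | (_, re) :: rest =>
    let b := match best with | none => re | some b0 => max b0 re
    b :: pvB_prefmax (some b) rest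

-- the hand-written while-loop binary search of Source B; starts[mid] is always in
-- range when lo < hi ≤ starts.length, so getD is exact there
def pvB_bisect (starts : List Int) (e : Int) (lo hi : Nat) : Nat :=
  if lo < hi then
    if starts.getD ((lo + hi) / 2) 0 < e then pvB_bisect starts e ((lo + hi) / 2 + 1) hi
    else pvB_bisect starts e lo ((lo + hi) / 2)
  else lo
termination_by hi - lo
decreasing_by all_goals omega

-- the `filtered` loop of Source B
def pvB_loop (starts : List Int) (prefmax : List Int) : List (List (String × Int)) → List (List (String × Int))
  | [] => []
  | span :: rest =>
    match pvGet span "start", pvGet span "end" with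
    | some s, some e =>
      let lo := pvB_bisect starts e 0 starts.length
      if 0 < lo ∧ prefmax.getD (lo - 1) 0 > s then pvB_loop starts prefmax rest
      else span :: pvB_loop starts prefmax rest
    | _, _ => pvB_loop starts prefmax rest

def filter_overlapping_spans_py_alt (spans : List (List (String × Int))) (reserved : List (List (String × Int))) : List (List (String × Int)) :=
  if spans = [] ∨ reserved = [] then spans
  else
    let ranges := PySem.List.sorted (pvB_ranges reserved) (fun r => r.1)
    let starts := ranges.map (fun r => r.1)
    let prefmax := pvB_prefmax none ranges
    pvB_loop starts prefmax spans

-- ===== PRECONDITION & SPEC =====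
def Spec_filter_overlapping_spans_py (spans : List (List (String × Int))) (reserved : List (List (String × Int))) (out : List (List (String × Int))) : Prop := out = filter_overlapping_spans_py_alt spans reserved
instance (spans : List (List (String × Int))) (reserved : List (List (String × Int))) (out : List (List (String × Int))) : Decidable (Spec_filter_overlapping_spans_py spans reserved out) := by unfold Spec_filter_overlapping_spans_py; infer_instance

-- ===== CLAIM (what is proved, stated in full; the proofs are below) =====
def Claim_equal_filter_overlapping_spans_py : Prop := ∀ (spans : List (List (String × Int))) (reserved : List (List (String × Int))), Dom_filter_overlapping_spans_py spans reserved → Spec_filter_overlapping_spans_py spans reserved (filter_overlapping_spans_py spans reserved)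

-- ===== LEMMAS AND PROOFS =====
lemma pv_ranges_eq (l : List (List (String × Int))) : pvA_ranges l = pvB_ranges l := by
  induction l with
  | nil => rfl
  | cons span rest ih =>
    simp only [pvA_ranges, pvB_ranges]
    cases pvGet span "start" <;> cases pvGet span "end" <;> simp [ih]

lemma getD_mono {starts : List Int} (hp : starts.Pairwise (· ≤ ·)) {i j : Nat}
    (hij : i ≤ j) (hj : j < starts.length) : starts.getD i 0 ≤ starts.getD j 0 := by
  rcases Nat.lt_or_ge i j with h | h
  · rw [List.getD_eq_getElem starts 0 (lt_of_le_of_lt hij hj), List.getD_eq_getElem starts 0 hj]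
    exact List.pairwise_iff_getElem.mp hp i j _ _ h
  · have : i = j := le_antisymm hij h
    subst this; rfl

lemma pvB_bisect_spec (starts : List Int) (e : Int) (hp : starts.Pairwise (· ≤ ·)) :
    ∀ (n lo hi : Nat), hi - lo ≤ n → lo ≤ hi → hi ≤ starts.length →
    (∀ i, i < lo → starts.getD i 0 < e) →
    (∀ i, hi ≤ i → i < starts.length → e ≤ starts.getD i 0) →
    lo ≤ pvB_bisect starts e lo hi ∧ pvB_bisect starts e lo hi ≤ hi ∧
    (∀ i, i < pvB_bisect starts e lo hi → starts.getD i 0 < e) ∧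
    (∀ i, pvB_bisect starts e lo hi ≤ i → i < starts.length → e ≤ starts.getD i 0) := by
  intro n
  induction n with
  | zero =>
    intro lo hi hfuel hle hlen hlo hhi
    have : lo = hi := by omega
    subst this
    rw [pvB_bisect]
    simp only [lt_irrefl, if_false]
    exact ⟨le_rfl, le_rfl, fun i hi' => hlo i hi', hhi⟩
  | succ n ih =>
    intro lo hi hfuel hle hlen hlo hhi
    rw [pvB_bisect]
    by_cases h : lo < hi
    · rw [if_pos h]
      have hmid1 : lo ≤ (lo + hi) / 2 := by omega
      have hmid2 : (lo + hi) / 2 < hi := by omega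
      by_cases hc : starts.getD ((lo + hi) / 2) 0 < e
      · rw [if_pos hc]
        refine (ih ((lo + hi) / 2 + 1) hi (by omega) (by omega) hlen ?_ hhi).imp (by omega) id
        intro i hi'
        rcases Nat.lt_or_ge i lo with h' | h'
        · exact hlo i h'
        · exact lt_of_le_of_lt (getD_mono hp (by omega) (by omega)) hc
      · rw [if_neg hc]
        rw [not_lt] at hc
        refine (ih lo ((lo + hi) / 2) (by omega) (by omega) (by omega) hlo ?_).imp id
          (fun h2 => ⟨by omega, h2.2⟩)
        intro i hi' hilen
        exact le_trans hc (getD_mono hp hi' hilen)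
    · rw [if_neg h]
      have : lo = hi := by omega
      subst this
      exact ⟨le_rfl, le_rfl, fun i hi' => hlo i hi', hhi⟩

lemma pvB_prefmax_gt (s : Int) :
    ∀ (R : List (Int × Int)) (b? : Option Int) (i : Nat), i < R.length →
    (s < (pvB_prefmax b? R).getD i 0 ↔
      (∃ b, b? = some b ∧ s < b) ∨ ∃ j, j ≤ i ∧ ∃ h : j < R.length, s < R[j].2) := by
  intro R
  induction R with
  | nil => intro b? i hi; simp at hi
  | cons p rest ih =>
    obtain ⟨rs, re⟩ := p
    intro b? i hi
    simp only [pvB_prefmax]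
    cases i with
    | zero =>
      simp only [List.getD_cons_zero]
      cases b? with
      | none =>
        simp only
        constructor
        · intro h; exact Or.inr ⟨0, le_rfl, by simpa using h⟩
        · rintro (⟨b, hb, _⟩ | ⟨j, hj, hjl, hlt⟩)
          · exact absurd hb (by simp)
          · have : j = 0 := by omega
            subst this; simpa using hlt
      | some b0 =>
        simp only [lt_max_iff]
        constructor
        · rintro (h | h)
          · exact Or.inl ⟨b0, rfl, h⟩
          · exact Or.inr ⟨0, le_rfl, by simpa using h⟩
        · rintro (⟨b, hb, hlt⟩ | ⟨j, hj, hjl, hlt⟩)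
          · cases hb; exact Or.inl hlt
          · have : j = 0 := by omega
            subst this; exact Or.inr (by simpa using hlt)
    | succ i' =>
      simp only [List.getD_cons_succ]
      rw [ih _ i' (by simpa using hi)]
      constructor
      · rintro (⟨b, hb, hlt⟩ | ⟨j, hj, hjl, hlt⟩)
        · -- b is the new best: s < b means b?-best or re
          cases hb
          cases b? with
          | none => exact Or.inr ⟨0, by omega, by simp, by simpa using hlt⟩
          | some b0 =>
            rcases lt_max_iff.mp hlt with h | h
            · exact Or.inl ⟨b0, rfl, h⟩
            · exact Or.inr ⟨0, by omega, by simp, by simpa using h⟩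
        · exact Or.inr ⟨j + 1, by omega, by simpa using hjl, by simpa using hlt⟩
      · rintro (⟨b, hb, hlt⟩ | ⟨j, hj, hjl, hlt⟩)
        · cases b? with
          | none => exact absurd hb (by simp)
          | some b0 =>
            cases hb
            exact Or.inl ⟨_, rfl, lt_max_iff.mpr (Or.inl hlt)⟩
        · cases j with
          | zero =>
            refine Or.inl ⟨_, rfl, ?_⟩
            cases b? with
            | none => simpa using hlt
            | some b0 => exact lt_max_iff.mpr (Or.inr (by simpa using hlt))
          | succ j' =>
            exact Or.inr ⟨j', by omega, by simpa using hjl, by simpa using hlt⟩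

lemma pvA_overlaps_iff (s e : Int) (L : List (Int × Int)) :
    pvA_overlaps s e L = true ↔ ∃ p ∈ L, s < p.2 ∧ p.1 < e := by
  induction L with
  | nil => simp [pvA_overlaps]
  | cons p rest ih =>
    obtain ⟨rs, re⟩ := p
    simp only [pvA_overlaps]
    by_cases h : s < re ∧ e > rs
    · rw [if_pos h]
      exact iff_of_true rfl ⟨(rs, re), by simp, h.1, h.2⟩
    · rw [if_neg h, ih]
      constructor
      · rintro ⟨p, hmem, h1, h2⟩; exact ⟨p, List.mem_cons_of_mem _ hmem, h1, h2⟩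
      · rintro ⟨p, hmem, h1, h2⟩
        rcases List.mem_cons.mp hmem with rfl | hmem'
        · exact absurd ⟨h1, h2⟩ h
        · exact ⟨p, hmem', h1, h2⟩

lemma pv_cond_eq (s e : Int) (L : List (Int × Int)) :
    (pvA_overlaps s e L = true) ↔
    (0 < pvB_bisect ((PySem.List.sorted L (fun r => r.1)).map (fun r => r.1)) e 0
          ((PySem.List.sorted L (fun r => r.1)).map (fun r => r.1)).length ∧
     (pvB_prefmax none (PySem.List.sorted L (fun r => r.1))).getD
        (pvB_bisect ((PySem.List.sorted L (fun r => r.1)).map (fun r => r.1)) e 0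
          ((PySem.List.sorted L (fun r => r.1)).map (fun r => r.1)).length - 1) 0 > s) := by
  have hp : (((PySem.List.sorted L (fun r => r.1)).map (fun r => r.1)) : List Int).Pairwise (· ≤ ·) :=
    PySem.List.sorted_map_key_pairwise L (fun r => r.1)
  generalize hR : PySem.List.sorted L (fun r => r.1) = R at *
  have hperm : R.Perm L := hR ▸ PySem.List.sorted_perm L (fun r => r.1) false
  obtain ⟨-, hk_le, hlt, hge⟩ :=
    pvB_bisect_spec (R.map (fun r => r.1)) e hp (R.map (fun r => r.1)).length 0
      (R.map (fun r => r.1)).length (by omega) (by omega) le_rfl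
      (fun i h => absurd h (by omega)) (fun i h1 h2 => absurd (lt_of_le_of_lt h1 h2) (by omega))
  set k := pvB_bisect (R.map (fun r => r.1)) e 0 (R.map (fun r => r.1)).length with hk
  have hlen : (R.map (fun r => r.1)).length = R.length := List.length_map _
  have hstarts : ∀ j (hj : j < R.length), (R.map (fun r => r.1)).getD j 0 = R[j].1 := by
    intro j hj
    rw [List.getD_eq_getElem _ 0 (by omega), List.getElem_map]
  rw [pvA_overlaps_iff]
  constructor
  · rintro ⟨p, hmem, h1, h2⟩
    have hmem' : p ∈ R := hperm.mem_iff.mpr hmem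
    obtain ⟨j, hj, rfl⟩ := List.getElem_of_mem hmem'
    have hjk : j < k := by
      by_contra hc
      have := hge j (by omega) (by omega)
      rw [hstarts j hj] at this
      omega
    have hk0 : 0 < k := by omega
    refine ⟨hk0, ?_⟩
    rw [gt_iff_lt, pvB_prefmax_gt s R none (k - 1) (by omega)]
    exact Or.inr ⟨j, by omega, hj, h1⟩
  · rintro ⟨hk0, hpm⟩
    rw [gt_iff_lt, pvB_prefmax_gt s R none (k - 1) (by omega)] at hpm
    rcases hpm with ⟨b, hb, -⟩ | ⟨j, hj, hjl, hlt'⟩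
    · exact absurd hb (by simp)
    · have h1 : R[j].1 < e := by
        have := hlt j (by omega)
        rwa [hstarts j hjl] at this
      exact ⟨R[j], hperm.mem_iff.mp (List.getElem_mem hjl), hlt', h1⟩

lemma pv_loop_eq (ranges : List (Int × Int)) (spans : List (List (String × Int))) :
    pvA_loop ranges spans =
      pvB_loop ((PySem.List.sorted ranges (fun r => r.1)).map (fun r => r.1))
        (pvB_prefmax none (PySem.List.sorted ranges (fun r => r.1))) spans := by
  induction spans with
  | nil => rfl
  | cons span rest ih =>
    rw [pvA_loop, pvB_loop]
    cases hs : pvGet span "start" <;> cases he : pvGet span "end" <;> try exact ih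
    case some.some s e =>
    show (if pvA_overlaps s e ranges then pvA_loop ranges rest else span :: pvA_loop ranges rest) =
      (if 0 < pvB_bisect ((PySem.List.sorted ranges (fun r => r.1)).map (fun r => r.1)) e 0
              ((PySem.List.sorted ranges (fun r => r.1)).map (fun r => r.1)).length ∧
            (pvB_prefmax none (PySem.List.sorted ranges (fun r => r.1))).getD
              (pvB_bisect ((PySem.List.sorted ranges (fun r => r.1)).map (fun r => r.1)) e 0
                ((PySem.List.sorted ranges (fun r => r.1)).map (fun r => r.1)).length - 1) 0 > s then
          pvB_loop ((PySem.List.sorted ranges (fun r => r.1)).map (fun r => r.1))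
            (pvB_prefmax none (PySem.List.sorted ranges (fun r => r.1))) rest
        else
          span :: pvB_loop ((PySem.List.sorted ranges (fun r => r.1)).map (fun r => r.1))
            (pvB_prefmax none (PySem.List.sorted ranges (fun r => r.1))) rest)
    by_cases h : pvA_overlaps s e ranges = true
    · rw [if_pos h, if_pos ((pv_cond_eq s e ranges).mp h), ih]
    · rw [if_neg (by simpa using h), if_neg (fun hc => h ((pv_cond_eq s e ranges).mpr hc)), ih]

-- ===== VERDICT (by name: the statement is the Claim_ definition above) =====
theorem filter_overlapping_spans_py_spec : Claim_equal_filter_overlapping_spans_py := by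
  intro spans reserved _hdom
  unfold Spec_filter_overlapping_spans_py filter_overlapping_spans_py filter_overlapping_spans_py_alt
  by_cases hnil : spans = [] ∨ reserved = []
  · rw [if_pos hnil, if_pos hnil]
  · rw [if_neg hnil, if_neg hnil, pv_ranges_eq, pv_loop_eq]
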